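-- pv_equiv track=rewrite | github.com/martinorosin/RhodeSchwarz-ZVB8 | martino_pylib.py | trova_in_lista
-- ===== SOURCE A (Python) =====
-- def trova_in_lista(lista,targets):
--     indici=([])
--     valori=([])
--     for elem in targets:
--
--         if elem <= min(lista):
--             indici.append(lista.index(min(lista)))
--             valori.append(min(lista))
--             continue
--
--         if elem >= max(lista):
--             indici.append(lista.index(max(lista)))
--             valori.append(max(lista))
--             continue
--
--         if min(lista) < elem < max(lista):
--             max_low=max([item for item in lista if item<=elem])
--             indici.append(lista.index(max_low))
--             valori.append(max_low)
--     return indici,valori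
-- ===== SOURCE B (Python) =====
-- def trova_in_lista(lista, targets):
--     first = {}
--     for i, v in enumerate(lista):
--         first.setdefault(v, i)
--     vals = sorted(first)
--     indici = []
--     valori = []
--     for t in targets:
--         lo, hi = 0, len(vals)
--         while lo < hi:
--             mid = (lo + hi) // 2
--             if t < vals[mid]:
--                 hi = mid
--             else:
--                 lo = mid + 1
--         v = vals[0] if lo == 0 else vals[lo - 1]
--         indici.append(first[v])
--         valori.append(v)
--     return indici, valori
-- ===== Notes on version B (the rewrite author's own statement) =====
-- stated objective: faster
-- what changed: A rescans the whole list per target (min/max/filter/index each time); B precomputes once a first-index dict and the sorted distinct values, then answers each target with a hand-written binary search (bisect_right) and one dict lookup.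
import Mathlib
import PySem

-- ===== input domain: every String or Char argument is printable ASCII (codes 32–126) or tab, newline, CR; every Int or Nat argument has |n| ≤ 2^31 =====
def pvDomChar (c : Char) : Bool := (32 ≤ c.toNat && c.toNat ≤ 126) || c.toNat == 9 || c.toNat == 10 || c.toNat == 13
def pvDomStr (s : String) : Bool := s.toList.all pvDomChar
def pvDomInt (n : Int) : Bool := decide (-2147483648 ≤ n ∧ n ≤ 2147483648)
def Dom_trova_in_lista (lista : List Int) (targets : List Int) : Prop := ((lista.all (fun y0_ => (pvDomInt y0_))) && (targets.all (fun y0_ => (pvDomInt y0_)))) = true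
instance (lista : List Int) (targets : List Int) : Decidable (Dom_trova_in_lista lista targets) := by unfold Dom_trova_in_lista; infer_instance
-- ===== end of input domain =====

-- B precomputes a first-index dict and the sorted distinct values once, then answers each
-- target by binary search — instead of A's full rescans (min/max/filter/index) per target.

-- ===== PORT A =====
-- one iteration of A's 'for elem in targets' loop (min/max/index/filter as in the Python)
def pvStepA (lista : List Int) (acc : List Int × List Int) (elem : Int) : List Int × List Int :=
  match PySem.List.min? lista (fun y => y), PySem.List.max? lista (fun y => y) with
  | some mn, some mx =>
    if elem ≤ mn then
      (acc.1 ++ [(((PySem.List.index? lista mn).getD 0 : Nat) : Int)], acc.2 ++ [mn])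
    else if mx ≤ elem then
      (acc.1 ++ [(((PySem.List.index? lista mx).getD 0 : Nat) : Int)], acc.2 ++ [mx])
    else if mn < elem ∧ elem < mx then
      match PySem.List.max? (lista.filter (fun item => item ≤ elem)) (fun y => y) with
      | some maxLow =>
        (acc.1 ++ [(((PySem.List.index? lista maxLow).getD 0 : Nat) : Int)], acc.2 ++ [maxLow])
      | none => acc                -- unreachable: the filter contains mn
    else acc
  | _, _ => acc                    -- Python raises here (empty lista); excluded by Pre_

def trova_in_lista (lista : List Int) (targets : List Int) : List Int × List Int :=
  targets.foldl (pvStepA lista) ([], [])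

-- ===== PORT B =====
-- first = {}; for i, v in enumerate(lista): first.setdefault(v, i)
def pvFirst (lista : List Int) : PySem.Dict Int Int :=
  (PySem.List.enumerate lista 0).foldl (fun d p => PySem.Dict.setdefault d p.2 p.1) PySem.Dict.empty

-- the hand-written while-loop binary search of Source B (bisect_right); the structural
-- fuel argument only makes the loop total (hi - lo ≤ fuel always holds at the call)
def pvBsrLoop (vals : List Int) (t : Int) : Nat → Nat → Nat → Nat
  | 0, lo, _ => lo
  | fuel + 1, lo, hi =>
    if lo < hi then
      let mid := (lo + hi) / 2
      if t < vals.getD mid 0 then pvBsrLoop vals t fuel lo mid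
      else pvBsrLoop vals t fuel (mid + 1) hi
    else lo

def pvBsr (vals : List Int) (t : Int) (lo hi : Nat) : Nat :=
  pvBsrLoop vals t (hi - lo) lo hi

-- one iteration of Source B's 'for t in targets' loop; getD defaults are never used under Pre_
-- (vals is nonempty and v is a key of first)
def pvStepB (first : PySem.Dict Int Int) (vals : List Int) (acc : List Int × List Int)
    (t : Int) : List Int × List Int :=
  let lo := pvBsr vals t 0 vals.length
  let v := if lo = 0 then vals.getD 0 0 else vals.getD (lo - 1) 0
  (acc.1 ++ [PySem.Dict.getD first v 0], acc.2 ++ [v])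

def trova_in_lista_alt (lista : List Int) (targets : List Int) : List Int × List Int :=
  let first := pvFirst lista
  let vals := PySem.List.sorted (PySem.Dict.keys first) (fun x => x) false
  targets.foldl (pvStepB first vals) ([], [])

-- ===== PRECONDITION & SPEC =====
-- Pre_ excludes only an empty lista with nonempty targets, on which the Python A raises
-- ValueError (min of empty sequence); with targets = [] both loops are empty and A returns.
def Pre_trova_in_lista (lista : List Int) (targets : List Int) : Prop := lista ≠ [] ∨ targets = []
instance (lista : List Int) (targets : List Int) : Decidable (Pre_trova_in_lista lista targets) := by
  unfold Pre_trova_in_lista; infer_instance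

def pvWitness_trova_in_lista : List Int × List Int := ([3, 1, 4, 1, 5], [0, 2, 4, 9])

def Spec_trova_in_lista (lista : List Int) (targets : List Int) (out : List Int × List Int) : Prop := out = trova_in_lista_alt lista targets
instance (lista : List Int) (targets : List Int) (out : List Int × List Int) : Decidable (Spec_trova_in_lista lista targets out) := by unfold Spec_trova_in_lista; infer_instance

-- ===== CLAIM (what is proved, stated in full; the proofs are below) =====
def Claim_equal_trova_in_lista : Prop := ∀ (lista : List Int) (targets : List Int), Dom_trova_in_lista lista targets → Pre_trova_in_lista lista targets → Spec_trova_in_lista lista targets (trova_in_lista lista targets)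

-- ===== LEMMAS AND PROOFS =====

-- the setdefault loop of pvFirst, generalized over start index and initial dict
theorem pvFirst_fold_get? (xs : List Int) : ∀ (s : Int) (d : PySem.Dict Int Int) (v : Int),
    ((PySem.List.enumerate xs s).foldl (fun d p => PySem.Dict.setdefault d p.2 p.1) d).get? v
      = ((d.get? v).or (Option.map (fun k : Nat => s + (k : Int)) (PySem.List.index? xs v))) := by
  induction xs with
  | nil =>
    intro s d v
    simp [PySem.List.enumerate_nil]
  | cons x xs ih =>
    intro s d v
    rw [PySem.List.enumerate_cons]
    simp only [List.foldl_cons]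
    rw [ih (s + 1) (PySem.Dict.setdefault d x s) v]
    by_cases hxv : x = v
    · subst hxv
      rw [PySem.Dict.get?_setdefault_self, PySem.List.index?_cons_self]
      cases hdv : d.get? x with
      | none => simp
      | some i => simp
    · rw [PySem.Dict.get?_setdefault_of_ne d s (Ne.symm hxv),
        PySem.List.index?_cons_of_ne xs hxv]
      cases hix : PySem.List.index? xs v with
      | none => simp
      | some k => simp; congr 1; omega

theorem pvFirst_get? (lista : List Int) (v : Int) :
    (pvFirst lista).get? v = Option.map (fun k : Nat => (k : Int)) (PySem.List.index? lista v) := by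
  unfold pvFirst
  rw [pvFirst_fold_get? lista 0 PySem.Dict.empty v]
  cases hix : PySem.List.index? lista v with
  | none => simp [hix]
  | some k => simp [hix]

theorem pvFirst_getD (lista : List Int) (v : Int) (hv : v ∈ lista) :
    PySem.Dict.getD (pvFirst lista) v 0 = (((PySem.List.index? lista v).getD 0 : Nat) : Int) := by
  obtain ⟨k, hk⟩ : ∃ k, PySem.List.index? lista v = some k := by
    cases hik : PySem.List.index? lista v with
    | none => exact absurd hv ((PySem.List.index?_eq_none_iff ..).mp hik)
    | some k => exact ⟨k, rfl⟩
  rw [PySem.Dict.getD_eq_get?_getD, pvFirst_get?, hk]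
  simp

theorem pvFirst_fold_keys_mem (xs : List Int) : ∀ (s : Int) (d : PySem.Dict Int Int) (v : Int),
    (v ∈ ((PySem.List.enumerate xs s).foldl (fun d p => PySem.Dict.setdefault d p.2 p.1) d).keys
      ↔ v ∈ d.keys ∨ v ∈ xs) := by
  induction xs with
  | nil =>
    intro s d v
    simp [PySem.List.enumerate_nil]
  | cons x xs ih =>
    intro s d v
    rw [PySem.List.enumerate_cons]
    simp only [List.foldl_cons]
    rw [ih (s + 1) (PySem.Dict.setdefault d x s) v]
    have hc : ((PySem.Dict.setdefault d x s).contains v = true) ↔ (d.contains v = true ∨ v = x) := by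
      rw [PySem.Dict.contains_setdefault]
      simp [Bool.or_eq_true, beq_iff_eq]
      tauto
    rw [← PySem.Dict.contains_iff_mem_keys, hc, PySem.Dict.contains_iff_mem_keys]
    simp [List.mem_cons]
    tauto

theorem pvFirst_fold_keys_nodup (xs : List Int) : ∀ (s : Int) (d : PySem.Dict Int Int),
    d.keys.Nodup →
    ((PySem.List.enumerate xs s).foldl (fun d p => PySem.Dict.setdefault d p.2 p.1) d).keys.Nodup := by
  induction xs with
  | nil =>
    intro s d hd
    simpa [PySem.List.enumerate_nil] using hd
  | cons x xs ih =>
    intro s d hd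
    rw [PySem.List.enumerate_cons]
    simp only [List.foldl_cons]
    apply ih (s + 1)
    by_cases hc : d.contains x = true
    · rw [PySem.Dict.setdefault_of_contains d s hc]; exact hd
    · rw [PySem.Dict.setdefault_of_not_contains d s (by simpa using hc)]
      rw [PySem.Dict.keys_insert_of_not_contains d s (by simpa using hc)]
      refine List.Nodup.append hd (List.nodup_singleton x) ?_
      intro a ha hb
      simp only [List.mem_singleton] at hb
      subst hb
      exact hc ((PySem.Dict.contains_iff_mem_keys ..).mpr ha)

theorem pvFirst_keys_perm (lista : List Int) :
    (pvFirst lista).keys.Perm (PySem.List.dedup lista) := by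
  have h1 : (pvFirst lista).keys.Nodup := by
    unfold pvFirst
    exact pvFirst_fold_keys_nodup lista 0 PySem.Dict.empty (by simp [PySem.Dict.keys_empty])
  refine (List.perm_ext_iff_of_nodup h1 (PySem.List.nodup_dedup lista)).mpr ?_
  intro v
  unfold pvFirst
  rw [pvFirst_fold_keys_mem lista 0 PySem.Dict.empty v, PySem.List.mem_dedup]
  simp [PySem.Dict.keys_empty]

-- vals = sorted(first) is the strictly increasing list of the distinct values of lista
theorem pvVals_eq (lista : List Int) :
    PySem.List.sorted (PySem.Dict.keys (pvFirst lista)) (fun x => x) false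
      = PySem.List.sorted (PySem.List.dedup lista) (fun x => x) false := by
  exact PySem.List.sorted_eq_sorted_of_perm _ _ _ (fun a b h => h) (pvFirst_keys_perm lista)

theorem pvVals_sorted_lt (lista : List Int) :
    (PySem.List.sorted (PySem.Dict.keys (pvFirst lista)) (fun x => x) false).Pairwise (· < ·) := by
  rw [pvVals_eq, PySem.List.dedup_eq_ofList]
  exact PySem.List.sorted_ofList_pairwise_lt lista

theorem pvVals_mem (lista : List Int) (v : Int) :
    v ∈ PySem.List.sorted (PySem.Dict.keys (pvFirst lista)) (fun x => x) false ↔ v ∈ lista := by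
  rw [pvVals_eq, PySem.List.mem_sorted, PySem.List.mem_dedup]

-- the hand-written loop is bisect_right
theorem pvBsr_eq_loop (vals : List Int) (t : Int) :
    ∀ (fuel fuel' lo hi : Nat), hi ≤ vals.length → hi - lo ≤ fuel → hi - lo ≤ fuel' →
      pvBsrLoop vals t fuel lo hi = PySem.List.bisectRightLoop vals t fuel' lo hi := by
  intro fuel
  induction fuel with
  | zero =>
    intro fuel' lo hi hlen hfuel hfuel'
    have hnlt : ¬ lo < hi := by omega
    cases fuel' with
    | zero => simp [pvBsrLoop, PySem.List.bisectRightLoop]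
    | succ fuel' =>
      rw [PySem.List.bisectRightLoop]
      simp [pvBsrLoop, hnlt]
  | succ fuel ih =>
    intro fuel' lo hi hlen hfuel hfuel'
    by_cases hlh : lo < hi
    · obtain ⟨fuel'', rfl⟩ : ∃ k, fuel' = k + 1 := ⟨fuel' - 1, by omega⟩
      have hmid : (lo + hi) / 2 < vals.length := by omega
      have hget : vals.getD ((lo + hi) / 2) 0 = vals[(lo + hi) / 2] :=
        List.getD_eq_getElem vals 0 hmid
      rw [pvBsrLoop, PySem.List.bisectRightLoop]
      simp only [hlh, if_pos, List.getElem?_eq_getElem hmid, hget]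
      by_cases hcmp : t < vals[(lo + hi) / 2]
      · simp only [hcmp, if_pos]
        exact ih fuel'' lo ((lo + hi) / 2) (by omega) (by omega) (by omega)
      · simp only [hcmp, if_false]
        exact ih fuel'' ((lo + hi) / 2 + 1) hi hlen (by omega) (by omega)
    · cases fuel' with
      | zero => simp [pvBsrLoop, PySem.List.bisectRightLoop, hlh]
      | succ fuel' =>
        rw [pvBsrLoop, PySem.List.bisectRightLoop]
        simp [hlh]

theorem pvBsr_eq_bisectRight (vals : List Int) (t : Int) :
    pvBsr vals t 0 vals.length = PySem.List.bisectRight vals t := by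
  rw [pvBsr, pvBsr_eq_loop vals t (vals.length - 0) vals.length 0 vals.length (le_refl _)
    (by omega) (by omega)]
  rfl

-- the per-target step functions agree (given a nonempty lista)
theorem pvStep_agree (lista : List Int) (h : lista ≠ []) (acc : List Int × List Int) (t : Int) :
    pvStepA lista acc t
      = pvStepB (pvFirst lista)
          (PySem.List.sorted (PySem.Dict.keys (pvFirst lista)) (fun x => x) false) acc t := by
  obtain ⟨mn, hmn⟩ : ∃ mn, PySem.List.min? lista (fun y => y) = some mn := by
    cases hm : PySem.List.min? lista (fun y => y) with
    | none => exact absurd ((PySem.List.min?_eq_none_iff lista _).mp hm) h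
    | some m => exact ⟨m, rfl⟩
  obtain ⟨mx, hmx⟩ : ∃ mx, PySem.List.max? lista (fun y => y) = some mx := by
    cases hm : PySem.List.max? lista (fun y => y) with
    | none => exact absurd ((PySem.List.max?_eq_none_iff lista _).mp hm) h
    | some m => exact ⟨m, rfl⟩
  have hmnmem : mn ∈ lista := PySem.List.min?_mem hmn
  have hmxmem : mx ∈ lista := PySem.List.max?_mem hmx
  have hmnmin : ∀ y ∈ lista, mn ≤ y := PySem.List.min?_isMin hmn
  have hmxmax : ∀ y ∈ lista, y ≤ mx := PySem.List.max?_isMax hmx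
  have hmem : ∀ v, v ∈ PySem.List.sorted (PySem.Dict.keys (pvFirst lista)) (fun x => x) false
      ↔ v ∈ lista := fun v => pvVals_mem lista v
  set vals := PySem.List.sorted (PySem.Dict.keys (pvFirst lista)) (fun x => x) false with hvals
  have hpair : vals.Pairwise (· < ·) := pvVals_sorted_lt lista
  have hg : ∀ (i j : Nat) (hi : i < vals.length) (hj : j < vals.length), i < j → vals[i] < vals[j] :=
    List.pairwise_iff_getElem.mp hpair
  have hmono : ∀ (i j : Nat) (hi : i < vals.length) (hj : j < vals.length), i ≤ j →
      vals[i] ≤ vals[j] := by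
    intro i j hi hj hij
    rcases Nat.lt_or_eq_of_le hij with hlt | heq
    · exact le_of_lt (hg i j hi hj hlt)
    · subst heq; exact le_refl _
  have hle : vals.Pairwise (· ≤ ·) := hpair.imp le_of_lt
  have hvne : vals ≠ [] := by
    intro h0
    have hm := (hmem mn).mpr hmnmem
    rw [h0] at hm
    simp at hm
  have hlen0 : 0 < vals.length := List.length_pos_of_ne_nil hvne
  have hrb : pvBsr vals t 0 vals.length = PySem.List.bisectRight vals t :=
    pvBsr_eq_bisectRight vals t
  obtain ⟨hrlen, hlow, hhigh⟩ := PySem.List.bisectRight_spec vals t hle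
  rw [← hrb] at hrlen hlow hhigh
  suffices hkey : ∃ w, w ∈ lista ∧
      pvStepA lista acc t
        = (acc.1 ++ [(((PySem.List.index? lista w).getD 0 : Nat) : Int)], acc.2 ++ [w]) ∧
      (if pvBsr vals t 0 vals.length = 0 then vals.getD 0 0
        else vals.getD (pvBsr vals t 0 vals.length - 1) 0) = w by
    obtain ⟨w, hwmem, hA, hB⟩ := hkey
    rw [hA]
    simp only [pvStepB]
    rw [hB, pvFirst_getD lista w hwmem]
  have h0 : vals[0] = mn := by
    refine le_antisymm ?_ (hmnmin _ ((hmem _).mp (List.getElem_mem hlen0)))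
    obtain ⟨j, hj, hjv⟩ := List.getElem_of_mem ((hmem mn).mpr hmnmem)
    calc vals[0] ≤ vals[j] := hmono 0 j hlen0 hj (Nat.zero_le j)
      _ = mn := hjv
  have hlast : vals[vals.length - 1]'(by omega) = mx := by
    refine le_antisymm (hmxmax _ ((hmem _).mp (List.getElem_mem (by omega)))) ?_
    obtain ⟨j, hj, hjv⟩ := List.getElem_of_mem ((hmem mx).mpr hmxmem)
    calc mx = vals[j] := hjv.symm
      _ ≤ vals[vals.length - 1]'(by omega) := hmono j _ hj (by omega) (by omega)
  by_cases h1 : t ≤ mn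
  · refine ⟨mn, hmnmem, ?_, ?_⟩
    · simp only [pvStepA, hmn, hmx]
      rw [if_pos h1]
    · by_cases hr0 : pvBsr vals t 0 vals.length = 0
      · rw [if_pos hr0, List.getD_eq_getElem vals 0 hlen0, h0]
      · rw [if_neg hr0,
          List.getD_eq_getElem vals 0 (show pvBsr vals t 0 vals.length - 1 < vals.length by omega)]
        exact le_antisymm (le_trans (hlow _ (by omega) (by omega)) h1)
          (hmnmin _ ((hmem _).mp (List.getElem_mem (by omega))))
  · by_cases h2 : mx ≤ t
    · refine ⟨mx, hmxmem, ?_, ?_⟩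
      · simp only [pvStepA, hmn, hmx]
        rw [if_neg h1, if_pos h2]
      · have hrall : pvBsr vals t 0 vals.length = vals.length := by
          by_contra hne
          have hlt : pvBsr vals t 0 vals.length < vals.length := by omega
          have ht1 := hhigh _ hlt (le_refl _)
          have ht2 := hmxmax _ ((hmem _).mp (List.getElem_mem hlt))
          omega
        have hidx : pvBsr vals t 0 vals.length - 1 < vals.length := by omega
        rw [if_neg (by omega), List.getD_eq_getElem vals 0 hidx]
        have : vals[pvBsr vals t 0 vals.length - 1]'hidx
            = vals[vals.length - 1]'(by omega) := by
          congr 1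
          omega
        rw [this, hlast]
    · have hcond : mn < t ∧ t < mx := ⟨by omega, by omega⟩
      have hfilne : mn ∈ lista.filter (fun item => item ≤ t) :=
        List.mem_filter.mpr ⟨hmnmem, by simp; omega⟩
      obtain ⟨m, hmlow⟩ : ∃ m,
          PySem.List.max? (lista.filter (fun item => item ≤ t)) (fun y => y) = some m := by
        cases hm : PySem.List.max? (lista.filter (fun item => item ≤ t)) (fun y => y) with
        | none =>
          rw [PySem.List.max?_eq_none_iff] at hm
          rw [hm] at hfilne
          simp at hfilne
        | some m => exact ⟨m, rfl⟩
      have hmfil := PySem.List.max?_mem hmlow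
      have hmlista : m ∈ lista := (List.mem_filter.mp hmfil).1
      have hmle : m ≤ t := by
        have := (List.mem_filter.mp hmfil).2
        simpa using this
      refine ⟨m, hmlista, ?_, ?_⟩
      · simp only [pvStepA, hmn, hmx]
        rw [if_neg h1, if_neg h2, if_pos hcond, hmlow]
      · have hrne0 : pvBsr vals t 0 vals.length ≠ 0 := by
          intro hr0
          have := hhigh 0 hlen0 (by omega)
          rw [h0] at this
          omega
        rw [if_neg hrne0,
          List.getD_eq_getElem vals 0 (show pvBsr vals t 0 vals.length - 1 < vals.length by omega)]
        have hvlemem : vals[pvBsr vals t 0 vals.length - 1]'(by omega) ∈ lista :=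
          (hmem _).mp (List.getElem_mem (by omega))
        have hvle : vals[pvBsr vals t 0 vals.length - 1]'(by omega) ≤ t :=
          hlow _ (by omega) (by omega)
        refine le_antisymm
          (PySem.List.max?_isMax hmlow _ (List.mem_filter.mpr ⟨hvlemem, by simpa using hvle⟩)) ?_
        obtain ⟨j, hj, hjv⟩ := List.getElem_of_mem ((hmem m).mpr hmlista)
        have hjr : j < pvBsr vals t 0 vals.length := by
          by_contra hge
          have := hhigh j hj (by omega)
          rw [hjv] at this
          omega
        calc m = vals[j] := hjv.symm
          _ ≤ vals[pvBsr vals t 0 vals.length - 1]'(by omega) := hmono j _ hj (by omega) (by omega)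

-- ===== VERDICT (by name: the statement is the Claim_ definition above) =====
theorem trova_in_lista_spec : Claim_equal_trova_in_lista := by
  intro lista targets _ hpre
  unfold Spec_trova_in_lista
  rcases hpre with hne | hempty
  · simp only [trova_in_lista, trova_in_lista_alt]
    exact PySem.List.foldl_congr_mem targets _ _ _ (fun acc x _ => pvStep_agree lista hne acc x)
  · subst hempty
    rfl
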